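-- pv_equiv track=rewrite | github.com/toro-nicolas/my_mathematics | 103cipher/message.py | get_str_matrix
-- ===== SOURCE A (Python) =====
-- def get_matrix_size(argv):
--     if len(argv[2]) == 1:
--         return 1
--     elif len(argv[2]) < 5:
--         return 2
--     elif len(argv[2]) < 10:
--         return 3
--     else:
--         return 4
--
-- def get_str_matrix(argv):
--     str_matrix = [[]]
--     size = get_matrix_size(argv)
--     row = 0
--     for i in range(len(argv[1])):
--         str_matrix[row].append(ord(argv[1][i]))
--         if (i + 1) != len(argv[1]) and (i + 1) % size == 0:
--             str_matrix.append([])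
--             row += 1
--     while len(str_matrix[row]) < size:
--         str_matrix[row].append(0)
--     return str_matrix
-- ===== SOURCE B (Python) =====
-- def get_matrix_size(argv):
--     if len(argv[2]) == 1:
--         return 1
--     elif len(argv[2]) < 5:
--         return 2
--     elif len(argv[2]) < 10:
--         return 3
--     else:
--         return 4
--
-- def get_str_matrix(argv):
--     size = get_matrix_size(argv)
--     codes = [ord(c) for c in argv[1]]
--     rows = []
--     i = 0
--     while len(codes) - i > size:
--         rows.append(codes[i:i + size])
--         i += size
--     rows.append(codes[i:] + [0] * (size - len(codes) + i))
--     return rows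
-- ===== Notes on version B (the rewrite author's own statement) =====
-- stated objective: simpler
-- what changed: Replaces the per-character loop that mutates a growing matrix via a row cursor (with an inner modulo test and a trailing zero-padding while-loop) by a single chunking loop that slices the code list in steps of size and pads only the final slice.
import Mathlib
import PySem

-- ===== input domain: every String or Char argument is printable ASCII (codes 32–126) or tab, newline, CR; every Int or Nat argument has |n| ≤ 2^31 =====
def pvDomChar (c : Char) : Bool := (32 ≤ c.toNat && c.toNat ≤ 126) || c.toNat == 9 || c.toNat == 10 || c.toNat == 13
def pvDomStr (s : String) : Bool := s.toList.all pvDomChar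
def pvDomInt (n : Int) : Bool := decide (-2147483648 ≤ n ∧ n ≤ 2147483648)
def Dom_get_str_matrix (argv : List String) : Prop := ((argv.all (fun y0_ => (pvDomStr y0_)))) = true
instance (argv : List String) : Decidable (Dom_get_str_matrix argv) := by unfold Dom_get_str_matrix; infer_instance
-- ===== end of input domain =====

-- B replaces A's per-character row-cursor loop (modulo test + trailing pad while-loop) by one
-- chunking loop slicing the code list in steps of `size`, padding only the last slice: simpler.

-- ===== PORT A =====
def pv_get_matrix_size (argv : List String) : Int :=
  if PySem.Str.len (argv.getD 2 "") = 1 then 1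
  else if PySem.Str.len (argv.getD 2 "") < 5 then 2
  else if PySem.Str.len (argv.getD 2 "") < 10 then 3
  else 4

-- the body of A's for-loop (state: the matrix and the current row index)
def pvStepA (n size : Int) (st : List (List Int) × Nat) (ic : Int × Char) :
    List (List Int) × Nat :=
  let m := st.1.set st.2 ((st.1.getD st.2 []) ++ [(ic.2.toNat : Int)])
  if ic.1 + 1 ≠ n ∧ PySem.Int.mod (ic.1 + 1) size = 0 then (m ++ [[]], st.2 + 1)
  else (m, st.2)

-- A's trailing `while len(str_matrix[row]) < size: str_matrix[row].append(0)`
-- (it only touches row `row`, so it is written on that row's list)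
def pvPadRow (l : List Int) (size : Int) : List Int :=
  if (l.length : Int) < size then pvPadRow (l ++ [0]) size else l
termination_by (size - l.length).toNat
decreasing_by simp; omega

-- A's last two lines: pad the current row in place, return the matrix
def pvFinish (size : Int) (st : List (List Int) × Nat) : List (List Int) :=
  st.1.set st.2 (pvPadRow (st.1.getD st.2 []) size)

def get_str_matrix (argv : List String) : List (List Int) :=
  pvFinish (pv_get_matrix_size argv)
    ((PySem.List.enumerate (argv.getD 1 "").toList 0).foldl
      (pvStepA (PySem.Str.len (argv.getD 1 "")) (pv_get_matrix_size argv)) ([[]], 0))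

-- ===== PORT B =====
-- B's while-loop: slice off full chunks; the `0 < size` conjunct only makes the recursion
-- total (Python B terminates whenever size ≥ 1, which get_matrix_size always yields)
def pvChunkLoop (codes : List Int) (size : Nat) (i : Nat) (rows : List (List Int)) :
    List (List Int) :=
  if 0 < size ∧ size < codes.length - i then
    pvChunkLoop codes size (i + size) (rows ++ [(codes.drop i).take size])
  else rows ++ [codes.drop i ++ List.replicate (size - (codes.length - i)) 0]
termination_by codes.length - i
decreasing_by omega

def get_str_matrix_alt (argv : List String) : List (List Int) :=
  pvChunkLoop ((argv.getD 1 "").toList.map (fun c => (c.toNat : Int)))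
    (pv_get_matrix_size argv).toNat 0 []

-- ===== PRECONDITION & SPEC =====
-- A indexes argv[1] and argv[2]: with fewer than 3 arguments Python A raises IndexError.
def Pre_get_str_matrix (argv : List String) : Prop := 3 ≤ argv.length
instance (argv : List String) : Decidable (Pre_get_str_matrix argv) := by
  unfold Pre_get_str_matrix; infer_instance
def pvWitness_get_str_matrix : List String := ["prog", "Hello", "key"]

def Spec_get_str_matrix (argv : List String) (out : List (List Int)) : Prop :=
  out = get_str_matrix_alt argv
instance (argv : List String) (out : List (List Int)) : Decidable (Spec_get_str_matrix argv out) := by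
  unfold Spec_get_str_matrix; infer_instance

-- ===== CLAIM (what is proved, stated in full; the proofs are below) =====
def Claim_equal_get_str_matrix : Prop := ∀ (argv : List String), Dom_get_str_matrix argv →
  Pre_get_str_matrix argv → Spec_get_str_matrix argv (get_str_matrix argv)

-- ===== LEMMAS AND PROOFS =====

-- the common characterization both ports are reduced to: chunks of `size`, last chunk padded
def pvChunks (size : Nat) (cs : List Int) : List (List Int) :=
  if cs.length ≤ size ∨ size = 0 then [cs ++ List.replicate (size - cs.length) 0]
  else cs.take size :: pvChunks size (cs.drop size)
termination_by cs.length
decreasing_by simp; omega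

lemma pv_size_pos (argv : List String) : 1 ≤ pv_get_matrix_size argv := by
  unfold pv_get_matrix_size; split_ifs <;> norm_num

lemma pv_getD_append (D : List (List Int)) (cur : List Int) :
    (D ++ [cur]).getD D.length [] = cur := by
  induction D with
  | nil => rfl
  | cons d D ih => simpa [List.getD] using ih

lemma pv_set_append (D : List (List Int)) (cur x : List Int) :
    (D ++ [cur]).set D.length x = D ++ [x] := by
  induction D with
  | nil => rfl
  | cons d D ih => simp [ih]

lemma pv_padRow_eq (size : Nat) (l : List Int) :
    pvPadRow l (size : Int) = l ++ List.replicate (size - l.length) 0 := by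
  rw [pvPadRow.eq_def]
  split_ifs with h
  · have hl : l.length < size := by exact_mod_cast h
    rw [pv_padRow_eq size (l ++ [0])]
    have h2 : size - l.length = (size - (l ++ [0]).length) + 1 := by simp; omega
    rw [h2, List.replicate_succ, List.append_assoc]
    rfl
  · have hl : size ≤ l.length := by omega
    simp [Nat.sub_eq_zero_of_le hl]
termination_by size - l.length
decreasing_by simp; omega

lemma pv_mod_succ' (j size r : Nat) (hs : 0 < size) (hj : j % size = r) :
    (j + 1) % size = (r + 1) % size := by
  have hr : r < size := hj ▸ Nat.mod_lt _ hs
  have h1 : j ≡ r [MOD size] := by unfold Nat.ModEq; rw [hj, Nat.mod_eq_of_lt hr]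
  exact h1.add_right 1

-- A's loop, started in a state whose finished rows are `D` and whose current row is `cur`
-- (the first `j` characters already consumed), followed by A's pad phase, produces
-- `D ++` the padded chunks of `cur` and the remaining characters.
lemma pv_loopA_eq (size : Nat) (hs : 1 ≤ size) :
    ∀ (cs : List Char) (j : Nat) (D : List (List Int)) (cur : List Int) (n : Int),
      n = (j : Int) + (cs.length : Int) →
      cur.length ≤ size →
      (cs ≠ [] → cur.length = j % size) →
      pvFinish (size : Int)
        ((PySem.List.enumerate cs (j : Int)).foldl (pvStepA n (size : Int)) (D ++ [cur], D.length))
      = D ++ pvChunks size (cur ++ cs.map (fun c => (c.toNat : Int))) := by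
  intro cs
  induction cs with
  | nil =>
    intro j D cur n hn hle _
    simp only [PySem.List.enumerate_nil, List.foldl_nil, List.map_nil, List.append_nil]
    unfold pvFinish
    rw [pv_getD_append, pv_padRow_eq, pv_set_append, pvChunks.eq_def]
    rw [if_pos (Or.inl hle)]
  | cons c cs ih =>
    intro j D cur n hn hle hcur
    have hcl : cur.length = j % size := hcur (by simp)
    have hclt : cur.length < size := by rw [hcl]; exact Nat.mod_lt _ hs
    rw [PySem.List.enumerate_cons, List.foldl_cons]
    have hstep : pvStepA n (size : Int) (D ++ [cur], D.length) ((j : Int), c) =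
        (if cs ≠ [] ∧ (j + 1) % size = 0
         then ((D ++ [cur ++ [(c.toNat : Int)]]) ++ [[]], D.length + 1)
         else (D ++ [cur ++ [(c.toNat : Int)]], D.length)) := by
      unfold pvStepA
      rw [pv_getD_append, pv_set_append]
      have h1 : ((j : Int) + 1 ≠ n) ↔ cs ≠ [] := by
        subst hn
        simp only [List.length_cons]
        push_cast
        constructor
        · intro h hcs; subst hcs; simp at h
        · intro h h2
          have hl0 : (cs.length : Int) = 0 := by omega
          exact h (by simpa using hl0)
      have h2 : PySem.Int.mod ((j : Int) + 1) (size : Int) = (((j + 1) % size : Nat) : Int) := by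
        have hc1 : ((j : Int) + 1) = ((j + 1 : Nat) : Int) := by push_cast; ring
        rw [hc1, PySem.Int.mod_natCast]
      rw [h2]
      by_cases hc : cs ≠ [] ∧ (j + 1) % size = 0
      · rw [if_pos ⟨h1.mpr hc.1, by exact_mod_cast congrArg (Nat.cast (R := Int)) hc.2⟩,
           if_pos hc]
      · rw [if_neg (fun hx => hc ⟨h1.mp hx.1, by exact_mod_cast hx.2⟩), if_neg hc]
    rw [hstep]
    have hjcast : ((j : Int) + 1) = (((j + 1 : Nat)) : Int) := by push_cast; ring
    rw [hjcast]
    by_cases hc : cs ≠ [] ∧ (j + 1) % size = 0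
    · rw [if_pos hc]
      have hm := pv_mod_succ' j size cur.length hs hcl.symm
      have hcur1 : cur.length + 1 = size := by
        rcases Nat.lt_or_ge (cur.length + 1) size with h | h
        · rw [Nat.mod_eq_of_lt h] at hm; omega
        · omega
      have hlen : D.length + 1 = (D ++ [cur ++ [(c.toNat : Int)]]).length := by simp
      have hn' : n = ((j + 1 : Nat) : Int) + (cs.length : Int) := by
        rw [hn]; simp only [List.length_cons]; push_cast; ring
      rw [hlen]
      rw [ih (j + 1) (D ++ [cur ++ [(c.toNat : Int)]]) [] n hn'
        (by simp) (fun _ => by simp [hc.2])]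
      simp only [List.nil_append]
      rw [List.append_assoc]
      congr 1
      have hne : cs ≠ [] := hc.1
      have hcs : 0 < cs.length := List.length_pos_iff.mpr hne
      have hsplit : cur ++ (c :: cs).map (fun c => (c.toNat : Int))
          = (cur ++ [(c.toNat : Int)]) ++ cs.map (fun c => (c.toNat : Int)) := by simp
      have htake : ((cur ++ [(c.toNat : Int)]) ++ cs.map (fun c => (c.toNat : Int))).take size
          = cur ++ [(c.toNat : Int)] := by
        rw [show size = (cur ++ [(c.toNat : Int)]).length from by simp; omega, List.take_left]
      have hdrop : ((cur ++ [(c.toNat : Int)]) ++ cs.map (fun c => (c.toNat : Int))).drop size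
          = cs.map (fun c => (c.toNat : Int)) := by
        rw [show size = (cur ++ [(c.toNat : Int)]).length from by simp; omega, List.drop_left]
      conv_rhs => rw [pvChunks.eq_def]
      rw [hsplit] at *
      rw [if_neg (by simp; omega), htake, hdrop]
      simp
    · rw [if_neg hc]
      have hn' : n = ((j + 1 : Nat) : Int) + (cs.length : Int) := by
        rw [hn]; simp only [List.length_cons]; push_cast; ring
      rw [ih (j + 1) D (cur ++ [(c.toNat : Int)]) n hn'
        (by simp; omega)
        (fun hne => by
          have hnz : (j + 1) % size ≠ 0 := fun h0 => hc ⟨hne, h0⟩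
          have hm := pv_mod_succ' j size cur.length hs hcl.symm
          have hlt : cur.length + 1 < size := by
            rcases Nat.lt_or_ge (cur.length + 1) size with h | h
            · exact h
            · exfalso
              have heq : cur.length + 1 = size := by omega
              rw [heq, Nat.mod_self] at hm
              exact hnz hm
          rw [Nat.mod_eq_of_lt hlt] at hm
          simp [hm])]
      congr 2
      simp

lemma pv_chunkLoop_eq (codes : List Int) (size : Nat) (hs : 1 ≤ size) :
    ∀ (i : Nat) (rows : List (List Int)),
      pvChunkLoop codes size i rows = rows ++ pvChunks size (codes.drop i) := by
  intro i rows
  rw [pvChunkLoop.eq_def]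
  split_ifs with h
  · rw [pv_chunkLoop_eq codes size hs (i + size) (rows ++ [(codes.drop i).take size])]
    rw [List.append_assoc]
    congr 1
    conv_rhs => rw [pvChunks.eq_def]
    rw [if_neg (by simp; omega)]
    simp [List.drop_drop, Nat.add_comm]
  · rw [pvChunks.eq_def]
    rw [if_pos (by simp; omega)]
    simp
termination_by i => codes.length - i
decreasing_by omega

-- ===== VERDICT (by name: the statement is the Claim_ definition above) =====
theorem get_str_matrix_spec : Claim_equal_get_str_matrix := by
  intro argv _ _
  unfold Spec_get_str_matrix get_str_matrix get_str_matrix_alt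
  have hs1 : 1 ≤ pv_get_matrix_size argv := pv_size_pos argv
  have hS : pv_get_matrix_size argv = (((pv_get_matrix_size argv).toNat : Nat) : Int) := by omega
  have hSpos : 1 ≤ (pv_get_matrix_size argv).toNat := by omega
  set S : Nat := (pv_get_matrix_size argv).toNat with hSdef
  set s : List Char := (argv.getD 1 "").toList with hsdef
  have hn : PySem.Str.len (argv.getD 1 "") = ((0 : Nat) : Int) + (s.length : Int) := by
    rw [PySem.Str.len_eq, ← hsdef]; push_cast; ring
  have hA := pv_loopA_eq S hSpos s 0 [] [] (PySem.Str.len (argv.getD 1 "")) hn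
    (by simp) (by simp)
  simp only [List.nil_append, List.length_nil, Nat.cast_zero] at hA
  rw [hS, hA]
  rw [pv_chunkLoop_eq _ _ hSpos 0 []]
  simp
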